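-- pv_equiv track=rewrite | github.com/hannahfriedman/PermStats | temp.py | two_sets_gen
-- ===== SOURCE A (Python) =====
-- def two_sets_gen(n: int) -> int:
--     count = 0
--     for i in range(1, n+1):
--         for j in range(1, n+1):
--             for k in range(i+1, n+1):
--                 for l in range(1, n+1):
--                     if l != j:
--                         count += 1
--     return count
-- ===== SOURCE B (Python) =====
-- def two_sets_gen(n: int) -> int:
--     # choices: ordered pair (i,k) with i<k from n values, times ordered pair (j,l) with j!=l
--     if n < 2:
--         return 0
--     pairs = n * (n - 1)
--     return pairs * pairs // 2
-- ===== Notes on version B (the rewrite author's own statement) =====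
-- stated objective: faster
-- what changed: Replaced the four nested loops by a closed-form product: the number of ordered index pairs i<k times the number of ordered pairs with l unequal to j, computed arithmetically.
import Mathlib
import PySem

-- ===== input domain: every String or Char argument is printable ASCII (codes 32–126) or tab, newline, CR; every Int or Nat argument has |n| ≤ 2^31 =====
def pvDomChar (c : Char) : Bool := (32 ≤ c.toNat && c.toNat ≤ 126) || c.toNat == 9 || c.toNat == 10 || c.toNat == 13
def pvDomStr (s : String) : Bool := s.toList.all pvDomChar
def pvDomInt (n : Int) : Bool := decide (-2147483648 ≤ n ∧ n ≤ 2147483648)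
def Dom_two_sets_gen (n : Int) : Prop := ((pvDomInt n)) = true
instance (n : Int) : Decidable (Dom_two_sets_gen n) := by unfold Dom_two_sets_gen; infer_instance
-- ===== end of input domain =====

-- B replaces A's four nested loops by the closed form n^2(n-1)^2/2; equivalence on all ints.

-- ===== PORT A =====
def two_sets_gen (n : Int) : Int :=
  (PySem.List.pyRange 1 (n+1)).foldl (fun count i =>
    (PySem.List.pyRange 1 (n+1)).foldl (fun count j =>
      (PySem.List.pyRange (i+1) (n+1)).foldl (fun count _k =>
        (PySem.List.pyRange 1 (n+1)).foldl (fun count l =>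
          if l ≠ j then count + 1 else count) count) count) count) 0

-- ===== PORT B =====
def two_sets_gen_alt (n : Int) : Int :=
  if n < 2 then 0
  else
    let pairs := n * (n - 1)
    PySem.Int.floordiv (pairs * pairs) 2

-- ===== PRECONDITION & SPEC =====
def Spec_two_sets_gen (n : Int) (out : Int) : Prop := out = two_sets_gen_alt n
instance (n : Int) (out : Int) : Decidable (Spec_two_sets_gen n out) := by unfold Spec_two_sets_gen; infer_instance

-- ===== CLAIM (what is proved, stated in full; the proofs are below) =====
def Claim_equal_two_sets_gen : Prop := ∀ (n : Int), Dom_two_sets_gen n → Spec_two_sets_gen n (two_sets_gen n)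

-- ===== LEMMAS AND PROOFS =====

-- range(1, n+1) is empty for n ≤ 0
theorem pvRange_empty (n : Int) (h : n ≤ 0) : PySem.List.pyRange 1 (n+1) = [] := by
  have hl : (PySem.List.pyRange 1 (n+1)).length = 0 := by
    rw [PySem.List.length_pyRange_one]; omega
  exact List.length_eq_zero_iff.mp hl

-- number of l in range(1,n+1) with l ≠ j, for j in that range
theorem pvCountP_ne (n j : Int) (h1 : 1 ≤ j) (h2 : j ≤ n) :
    (PySem.List.pyRange 1 (n+1)).countP (fun l => decide (l ≠ j)) = n.toNat - 1 := by
  have hmem : j ∈ PySem.List.pyRange 1 (n+1) := PySem.List.mem_pyRange_one.mpr ⟨h1, by omega⟩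
  have hc : (PySem.List.pyRange 1 (n+1)).count j = 1 :=
    List.count_eq_one_of_mem (PySem.List.nodup_pyRange_one 1 (n+1)) hmem
  have hsplit := List.length_eq_countP_add_countP (l := PySem.List.pyRange 1 (n+1))
    (p := fun l => decide (l ≠ j))
  have hlen := PySem.List.length_pyRange_one 1 (n+1)
  have hcp : (PySem.List.pyRange 1 (n+1)).countP (fun a => decide (¬decide (a ≠ j) = true)) = 1 := by
    rw [← hc, List.count]; congr 1; funext l
    by_cases h : l = j <;> simp [h]
  rw [hcp] at hsplit
  omega

-- 2 * Σ_{i ∈ range(1,m+1)} (m - i) = m (m - 1)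
theorem pvSum_range (m : Nat) :
    2 * ((PySem.List.pyRange 1 ((m:Int)+1)).map (fun i => (m:Int) - i)).sum = (m:Int) * ((m:Int) - 1) := by
  induction m with
  | zero => simp
  | succ m ih =>
    have hsplit : PySem.List.pyRange 1 (((m:Int)+1)+1) =
        PySem.List.pyRange 1 ((m:Int)+1) ++ [(m:Int)+1] :=
      PySem.List.pyRange_one_succ_right (by omega)
    have hfun : ((PySem.List.pyRange 1 ((m:Int)+1)).map (fun i => ((m:Int)+1) - i))
        = (PySem.List.pyRange 1 ((m:Int)+1)).map (fun i => ((m:Int) - i) + 1) := by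
      apply List.map_congr_left; intro i _; ring
    have hadd := PySem.List.sum_map_add_int (PySem.List.pyRange 1 ((m:Int)+1))
      (fun i => (m:Int) - i) (fun _ => (1:Int))
    have hconst := PySem.List.sum_map_const_int (PySem.List.pyRange 1 ((m:Int)+1)) (1:Int)
    have hlen : (((PySem.List.pyRange 1 ((m:Int)+1)).length : Nat) : Int) = m := by
      rw [PySem.List.length_pyRange_one]; omega
    push_cast
    rw [hsplit, List.map_append, List.sum_append, hfun, hadd, hconst, hlen]
    simp only [List.map_cons, List.map_nil, List.sum_cons, List.sum_nil, mul_one, add_zero, sub_self]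
    nlinarith [ih]

-- innermost loop over l, for a fixed admissible j
theorem pvInner (n j c : Int) (h1 : 1 ≤ j) (h2 : j ≤ n) :
    (PySem.List.pyRange 1 (n+1)).foldl
      (fun count l => if l ≠ j then count + 1 else count) c = c + (n - 1) := by
  have h := PySem.List.foldl_count_if (fun l => decide (l ≠ j)) (PySem.List.pyRange 1 (n+1)) c
  simp only [decide_eq_true_eq] at h
  rw [h, pvCountP_ne n j h1 h2]
  omega

theorem two_sets_gen_eq_sum (n : Int) (hn : 1 ≤ n) :
    two_sets_gen n = n * (n - 1) * ((PySem.List.pyRange 1 (n+1)).map (fun i => n - i)).sum := by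
  unfold two_sets_gen
  -- collapse the j/k/l loops: each i contributes n * (n - i) * (n - 1)
  rw [PySem.List.foldl_congr_mem _ _
      (fun count i => count + n * ((n - i) * (n - 1))) 0 ?_]
  · rw [PySem.List.foldl_add]
    have : (PySem.List.pyRange 1 (n+1)).map (fun i => n * ((n - i) * (n - 1))) =
        (PySem.List.pyRange 1 (n+1)).map (fun i => (n * (n - 1)) * (n - i)) := by
      apply List.map_congr_left; intro i _; ring
    rw [this, PySem.List.sum_map_const_mul_int]
    simp only [zero_add]
  · intro c i hi
    have hi' := PySem.List.mem_pyRange_one.mp hi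
    -- j loop: each j contributes (n - i) * (n - 1)
    rw [PySem.List.foldl_congr_mem _ _
        (fun count j => count + (n - i) * (n - 1)) c ?_]
    · rw [PySem.List.foldl_add]
      rw [PySem.List.sum_map_const_int, PySem.List.length_pyRange_one]
      have : ((n + 1 - 1).toNat : Int) = n := by omega
      rw [this]
    · intro c' j hj
      have hj' := PySem.List.mem_pyRange_one.mp hj
      -- k loop: each k contributes n - 1
      rw [PySem.List.foldl_congr_mem _ _
          (fun count _ => count + (n - 1)) c' ?_]
      · rw [PySem.List.foldl_add]
        rw [PySem.List.sum_map_const_int, PySem.List.length_pyRange_one]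
        have : ((n + 1 - (i + 1)).toNat : Int) = n - i := by omega
        rw [this]
      · intro c'' k _
        exact pvInner n j c'' hj'.1 (by omega)

-- ===== VERDICT (by name: the statement is the Claim_ definition above) =====
theorem two_sets_gen_spec : Claim_equal_two_sets_gen := by
  intro n _
  show two_sets_gen n = two_sets_gen_alt n
  by_cases hn : n ≤ 0
  · unfold two_sets_gen two_sets_gen_alt
    rw [pvRange_empty n hn, if_pos (by omega)]
    rfl
  · have hn1 : 1 ≤ n := by omega
    set S := ((PySem.List.pyRange 1 (n+1)).map (fun i => n - i)).sum with hS
    have h2S : 2 * S = n * (n - 1) := by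
      have := pvSum_range n.toNat
      have hcast : ((n.toNat : Int)) = n := by omega
      rw [hcast] at this
      exact this
    rw [two_sets_gen_eq_sum n hn1]
    unfold two_sets_gen_alt
    by_cases h2 : n < 2
    · rw [if_pos h2]
      have hone : n = 1 := by omega
      subst hone
      norm_num
    · rw [if_neg h2]
      have hp : n * (n - 1) = 2 * S := h2S.symm
      show n * (n - 1) * S = PySem.Int.floordiv (n * (n - 1) * (n * (n - 1))) 2
      rw [PySem.Int.floordiv_eq_ediv_of_pos (by omega), hp]
      have : 2 * S * (2 * S) = 2 * (S * (2 * S)) := by ring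
      rw [this, Int.mul_ediv_cancel_left _ (by norm_num)]
      ring
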